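-- pv_equiv track=rewrite | github.com/mun-gio/programmers | 프로그래머스/1/42840. 모의고사/모의고사.py | solution
-- ===== SOURCE A (Python) =====
-- def solution(answers):
--     n1 = [1, 2, 3, 4, 5]
--     n2 = [2, 1, 2, 3, 2, 4, 2, 5]
--     n3 = [3, 3, 1, 1, 2, 2, 4, 4, 5, 5]
--
--     n1n, n2n, n3n = 0,0,0
--     answer = []
--
--     if len(answers) > len(n1):
--         for i in range(len(answers)-len(n1)):
--             n1.append(n1[i])
--     if len(answers) > len(n2):
--         for i in range(len(answers)-len(n2)):
--             n2.append(n2[i])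
--     if len(answers) > len(n3):
--         for i in range(len(answers)-len(n3)):
--             n3.append(n3[i])
--
--     for i in range(len(answers)):
--         if answers[i] == n1[i]:
--             n1n += 1
--         if answers[i] == n2[i]:
--             n2n += 1
--         if answers[i] == n3[i]:
--             n3n += 1
--
--     if n1n == max(n1n, n2n, n3n):
--         answer.append(1)
--     if n2n == max(n1n, n2n, n3n):
--         answer.append(2)
--     if n3n == max(n1n, n2n, n3n):
--         answer.append(3)
--     return answer
-- ===== SOURCE B (Python) =====
-- def solution(answers):
--     # Aggregate once: the three patterns are periodic with periods 5, 8, 10, all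
--     # dividing 120, so a histogram of (position mod 120, given answer) determines
--     # every score; each pattern is then scored from the 120-slot histogram alone.
--     hist = {}
--     for i, a in enumerate(answers):
--         key = (i % 120, a)
--         hist[key] = hist.get(key, 0) + 1
--     patterns = ([1, 2, 3, 4, 5],
--                 [2, 1, 2, 3, 2, 4, 2, 5],
--                 [3, 3, 1, 1, 2, 2, 4, 4, 5, 5])
--     scores = [sum(hist.get((r, p[r % len(p)]), 0) for r in range(120))
--               for p in patterns]
--     best = max(scores)
--     return [k for k in (1, 2, 3) if scores[k - 1] == best]
-- ===== Notes on version B (the rewrite author's own statement) =====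
-- stated objective: alternative
-- what changed: B replaces A's extend-patterns-then-compare-elementwise scan by an aggregate-then-score algorithm: one pass builds a histogram keyed by (index mod 120, given answer) (120 = lcm of the three pattern periods), each score is then read off the 120-slot histogram without touching answers again, and the result is one max plus a comprehension instead of A's three append-ifs each recomputing max.
import Mathlib
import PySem

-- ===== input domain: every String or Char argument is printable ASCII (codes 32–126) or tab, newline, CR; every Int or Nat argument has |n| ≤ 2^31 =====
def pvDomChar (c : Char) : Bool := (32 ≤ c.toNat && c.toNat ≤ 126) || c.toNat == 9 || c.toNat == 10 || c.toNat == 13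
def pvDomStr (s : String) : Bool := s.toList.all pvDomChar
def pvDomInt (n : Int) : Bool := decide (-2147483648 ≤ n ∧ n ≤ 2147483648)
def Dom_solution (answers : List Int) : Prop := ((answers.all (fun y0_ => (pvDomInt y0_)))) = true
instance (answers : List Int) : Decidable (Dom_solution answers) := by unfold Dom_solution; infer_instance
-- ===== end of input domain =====

-- B replaces A's extend-then-compare scan by aggregate-then-score: one pass builds a
-- histogram keyed by (index mod 120, given answer), each pattern's score is then read
-- off the histogram alone; objective: alternative algorithm, same asymptotic cost.

-- ===== PORT A =====
-- the extension loop 'for i in range(k): pat.append(pat[i])' (index always in range in A, so pyGetD is exact)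
def pvExtA (pat : List Int) (k : Int) : List Int :=
  (PySem.List.pyRange 0 k 1).foldl (fun l i => l ++ [PySem.List.pyGetD l i 0]) pat

def solution (answers : List Int) : List Int :=
  let n1 : List Int := [1, 2, 3, 4, 5]
  let n2 : List Int := [2, 1, 2, 3, 2, 4, 2, 5]
  let n3 : List Int := [3, 3, 1, 1, 2, 2, 4, 4, 5, 5]
  let n1 := if PySem.List.len answers > PySem.List.len n1 then
              pvExtA n1 (PySem.List.len answers - PySem.List.len n1) else n1
  let n2 := if PySem.List.len answers > PySem.List.len n2 then
              pvExtA n2 (PySem.List.len answers - PySem.List.len n2) else n2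
  let n3 := if PySem.List.len answers > PySem.List.len n3 then
              pvExtA n3 (PySem.List.len answers - PySem.List.len n3) else n3
  -- the counting loop: three independent statement-ifs over (n1n, n2n, n3n)
  let c :=
    (PySem.List.pyRange 0 (PySem.List.len answers) 1).foldl
      (fun (s : Int × Int × Int) i =>
        (if PySem.List.pyGetD answers i 0 = PySem.List.pyGetD n1 i 0 then s.1 + 1 else s.1,
         if PySem.List.pyGetD answers i 0 = PySem.List.pyGetD n2 i 0 then s.2.1 + 1 else s.2.1,
         if PySem.List.pyGetD answers i 0 = PySem.List.pyGetD n3 i 0 then s.2.2 + 1 else s.2.2))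
      (0, 0, 0)
  let answer : List Int := []
  let answer := if c.1 = max c.1 (max c.2.1 c.2.2) then answer ++ [1] else answer
  let answer := if c.2.1 = max c.1 (max c.2.1 c.2.2) then answer ++ [2] else answer
  if c.2.2 = max c.1 (max c.2.1 c.2.2) then answer ++ [3] else answer

-- ===== PORT B =====
-- 'hist[key] = hist.get(key, 0) + 1' over enumerate(answers) with key = (i % 120, a)
def pvHistB (answers : List Int) : PySem.Dict (Int × Int) Int :=
  (PySem.List.enumerate answers 0).foldl
    (fun d ia =>
      let key : Int × Int := (PySem.Int.mod ia.1 120, ia.2)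
      d.insert key (d.getD key 0 + 1))
    PySem.Dict.empty

-- sum(hist.get((r, p[r % len(p)]), 0) for r in range(120))
def pvScoreB (hist : PySem.Dict (Int × Int) Int) (pat : List Int) : Int :=
  ((PySem.List.pyRange 0 120 1).map (fun r =>
    hist.getD (r, PySem.List.pyGetD pat (PySem.Int.mod r (PySem.List.len pat)) 0) 0)).sum

def solution_alt (answers : List Int) : List Int :=
  let hist := pvHistB answers
  let scores : List Int := [pvScoreB hist [1, 2, 3, 4, 5],
                            pvScoreB hist [2, 1, 2, 3, 2, 4, 2, 5],
                            pvScoreB hist [3, 3, 1, 1, 2, 2, 4, 4, 5, 5]]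
  let best := (PySem.List.max? scores (fun y => y)).getD 0  -- scores has 3 elements: max() never raises
  ([1, 2, 3] : List Int).filter (fun k => PySem.List.pyGetD scores (k - 1) 0 = best)

-- ===== PRECONDITION & SPEC =====
def Spec_solution (answers : List Int) (out : List Int) : Prop := out = solution_alt answers
instance (answers : List Int) (out : List Int) : Decidable (Spec_solution answers out) := by unfold Spec_solution; infer_instance

-- ===== CLAIM (what is proved, stated in full; the proofs are below) =====
def Claim_equal_solution : Prop := ∀ (answers : List Int), Dom_solution answers → Spec_solution answers (solution answers)

-- ===== LEMMAS AND PROOFS =====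

-- pure-Nat form of A's extension loop
def pvExtN (pat : List Int) (n : Nat) : List Int :=
  (List.range n).foldl (fun l i => l ++ [l.getD i 0]) pat

lemma pvExtA_eq_pvExtN (pat : List Int) (n : Nat) : pvExtA pat (n : Int) = pvExtN pat n := by
  unfold pvExtA pvExtN
  rw [PySem.List.pyRange_zero_natCast, List.foldl_map]
  simp [PySem.List.pyGetD_natCast]

lemma pvExtN_succ (pat : List Int) (n : Nat) :
    pvExtN pat (n + 1) = pvExtN pat n ++ [(pvExtN pat n).getD n 0] := by
  unfold pvExtN
  rw [List.range_succ, List.foldl_append]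
  rfl

lemma pvExtN_length (pat : List Int) (n : Nat) : (pvExtN pat n).length = pat.length + n := by
  induction n with
  | zero => rfl
  | succ n ih =>
    rw [pvExtN_succ, List.length_append, ih]
    rfl

lemma pvExtN_getD (pat : List Int) (hp : 0 < pat.length) (n : Nat) :
    ∀ k < pat.length + n, (pvExtN pat n).getD k 0 = pat.getD (k % pat.length) 0 := by
  induction n with
  | zero =>
    intro k hk
    rw [Nat.mod_eq_of_lt (by omega)]
    rfl
  | succ n ih =>
    intro k hk
    rw [pvExtN_succ]
    by_cases h : k < pat.length + n
    · rw [List.getD_append _ _ _ _ (by rw [pvExtN_length]; omega)]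
      exact ih k h
    · have hk' : k = pat.length + n := by omega
      subst hk'
      rw [List.getD_append_right _ _ _ _ (by rw [pvExtN_length])]
      rw [pvExtN_length, Nat.sub_self, List.getD_cons_zero]
      rw [ih n (by omega), Nat.add_mod_left]

-- the effective pattern list A indexes (extended iff shorter than answers), read at i < len answers
lemma pvEff_getD (answers pat : List Int) (hp : 0 < pat.length) (i : Nat)
    (hi : i < answers.length) :
    (if (answers.length : Int) > (pat.length : Int) then
        pvExtA pat ((answers.length : Int) - (pat.length : Int)) else pat).getD i 0
      = pat.getD (i % pat.length) 0 := by
  by_cases h : pat.length < answers.length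
  · rw [if_pos (by exact_mod_cast h)]
    have hcast : ((answers.length : Int) - (pat.length : Int))
        = ((answers.length - pat.length : Nat) : Int) := by omega
    rw [hcast, pvExtA_eq_pvExtN]
    exact pvExtN_getD pat hp _ i (by omega)
  · rw [if_neg (by exact_mod_cast h)]
    rw [Nat.mod_eq_of_lt (by omega)]

-- counting predicate shared by both characterisations
def pvCnt (answers pat : List Int) : Int :=
  (((List.range answers.length).countP
      (fun i => decide (answers.getD i 0 = pat.getD (i % pat.length) 0))) : Nat)

lemma pvTripleFold {alpha : Type} (p1 p2 p3 : alpha -> Prop)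
    [DecidablePred p1] [DecidablePred p2] [DecidablePred p3] (l : List alpha) (a b c : Int) :
    l.foldl (fun (s : Int × Int × Int) i =>
        (if p1 i then s.1 + 1 else s.1,
         if p2 i then s.2.1 + 1 else s.2.1,
         if p3 i then s.2.2 + 1 else s.2.2)) (a, b, c)
      = (a + l.countP (fun i => decide (p1 i)),
         b + l.countP (fun i => decide (p2 i)),
         c + l.countP (fun i => decide (p3 i))) := by
  induction l generalizing a b c with
  | nil => simp
  | cons x t ih =>
    simp only [List.foldl_cons, List.countP_cons]
    rw [ih]
    refine Prod.ext ?_ (Prod.ext ?_ ?_) <;> simp <;> split_ifs <;> omega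

-- A's per-pattern count over pyRange equals pvCnt
lemma pvCntA_eq (answers pat : List Int) (hp : 0 < pat.length) :
    (((PySem.List.pyRange 0 (PySem.List.len answers) 1).countP
        (fun i => decide (PySem.List.pyGetD answers i 0 =
          PySem.List.pyGetD (if PySem.List.len answers > PySem.List.len pat then
            pvExtA pat (PySem.List.len answers - PySem.List.len pat) else pat) i 0))) : Int)
      = pvCnt answers pat := by
  simp only [PySem.List.len_eq]
  rw [PySem.List.pyRange_zero_natCast, List.countP_map]
  unfold pvCnt
  congr 1
  apply List.countP_congr
  intro i hi
  rw [List.mem_range] at hi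
  simp only [Function.comp, PySem.List.pyGetD_natCast, decide_eq_true_eq]
  rw [pvEff_getD answers pat hp i hi]

-- B's histogram loop is the Counter of the key list (i % 120, answers[i])
lemma pvHistB_eq_counter (answers : List Int) :
    pvHistB answers
      = PySem.Dict.counter ((PySem.List.enumerate answers 0).map
          (fun ia => (PySem.Int.mod ia.1 120, ia.2))) := by
  unfold pvHistB
  rw [← PySem.Dict.foldl_insert_getD_add_one_eq_counter, List.foldl_map]

set_option maxRecDepth 8192 in
-- summing the per-residue match counts over the 120 residue classes recovers one countP
lemma pvSumResidues (l : List Nat) (p : Nat → Prop) [DecidablePred p] :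
    ((List.range 120).map (fun rn =>
        ((l.countP (fun i => decide (i % 120 = rn ∧ p i)) : Nat) : Int))).sum
      = ((l.countP (fun i => decide (p i)) : Nat) : Int) := by
  induction l with
  | nil => simp
  | cons x t ih =>
    simp only [List.countP_cons, Nat.cast_add, Nat.cast_ite, Nat.cast_one, Nat.cast_zero]
    rw [PySem.List.sum_map_add_int, ih]
    congr 1
    by_cases hp : p x
    · have h1 : ∀ rn : Nat, (decide (x % 120 = rn ∧ p x)) = decide (x % 120 = rn) := by
        intro rn; simp [hp]
      simp only [h1]
      rw [PySem.List.sum_map_ite_one_zero (fun rn => decide (x % 120 = rn))]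
      have hcnt : (List.range 120).countP (fun rn => decide (x % 120 = rn)) = 1 := by
        have hc : (List.range 120).countP (fun rn => decide (x % 120 = rn))
            = List.count (x % 120) (List.range 120) := by
          rw [List.count_eq_countP]
          apply List.countP_congr
          intro rn _
          simp only [decide_eq_true_eq, beq_iff_eq]
          exact eq_comm
        rw [hc]
        exact List.count_eq_one_of_mem List.nodup_range
          (List.mem_range.mpr (Nat.mod_lt _ (by norm_num)))
      simp [hcnt, hp]
    · simp [hp]

set_option maxRecDepth 8192 in
-- B's histogram score equals the direct match count (pattern period divides 120)
lemma pvScoreB_eq (answers pat : List Int) (hd : pat.length ∣ 120) :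
    pvScoreB (pvHistB answers) pat = pvCnt answers pat := by
  unfold pvScoreB pvCnt
  rw [pvHistB_eq_counter, PySem.List.enumerate_eq_map_pyRange answers 0]
  simp only [PySem.List.len_eq]
  rw [show (120 : Int) = ((120 : Nat) : Int) by norm_num]
  simp only [PySem.List.pyRange_zero_natCast, List.map_map, PySem.Dict.getD_counter,
    List.count_eq_countP, List.countP_map]
  rw [← pvSumResidues (List.range answers.length)
        (fun i => answers.getD i 0 = pat.getD (i % pat.length) 0)]
  congr 1
  apply List.map_congr_left
  intro rn hrn
  simp only [Function.comp_apply]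
  congr 1
  apply List.countP_congr
  intro i hi
  simp only [Function.comp_apply]
  simp only [PySem.Int.mod_natCast, PySem.List.pyGetD_natCast, beq_iff_eq, Prod.mk.injEq,
    decide_eq_true_eq, Nat.cast_inj]
  constructor
  · rintro ⟨h1, h2⟩
    exact ⟨h1, by rw [h2, ← h1, Nat.mod_mod_of_dvd i hd]⟩
  · rintro ⟨h1, h2⟩
    exact ⟨h1, by rw [h2, ← h1, Nat.mod_mod_of_dvd i hd]⟩

-- the final if-chain of A equals B's filter over [1, 2, 3]
lemma pvAssemble (s1 s2 s3 : Int) :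
    (if s3 = max s1 (max s2 s3) then
       (if s2 = max s1 (max s2 s3) then
          (if s1 = max s1 (max s2 s3) then ([] : List Int) ++ [1] else []) ++ [2]
        else (if s1 = max s1 (max s2 s3) then ([] : List Int) ++ [1] else [])) ++ [3]
     else (if s2 = max s1 (max s2 s3) then
             (if s1 = max s1 (max s2 s3) then ([] : List Int) ++ [1] else []) ++ [2]
           else (if s1 = max s1 (max s2 s3) then ([] : List Int) ++ [1] else [])))
    = ([1, 2, 3] : List Int).filter
        (fun k => PySem.List.pyGetD [s1, s2, s3] (k - 1) 0
                    = (PySem.List.max? [s1, s2, s3] (fun y => y)).getD 0) := by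
  rw [PySem.List.max?_id_cons]
  have hm : List.foldl max s1 [s2, s3] = max s1 (max s2 s3) := by
    simp [max_assoc]
  rw [hm]
  have h1 : PySem.List.pyGetD [s1, s2, s3] ((1:Int) - 1) 0 = s1 := by
    norm_num [PySem.List.pyGetD, PySem.List.pyIdx?]
  have h2 : PySem.List.pyGetD [s1, s2, s3] ((2:Int) - 1) 0 = s2 := by
    norm_num [PySem.List.pyGetD, PySem.List.pyIdx?]
  have h3 : PySem.List.pyGetD [s1, s2, s3] ((3:Int) - 1) 0 = s3 := by
    norm_num [PySem.List.pyGetD, PySem.List.pyIdx?]; rfl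
  simp only [List.filter_cons, List.filter_nil, h1, h2, h3, Option.getD_some, decide_eq_true_eq]
  split_ifs <;> rfl

-- ===== VERDICT (by name: the statement is the Claim_ definition above) =====
theorem solution_spec : Claim_equal_solution := by
  intro answers _
  unfold Spec_solution
  simp only [solution, solution_alt]
  rw [pvTripleFold]
  simp only [zero_add]
  rw [pvCntA_eq answers _ (by decide), pvCntA_eq answers _ (by decide),
      pvCntA_eq answers _ (by decide)]
  rw [pvScoreB_eq answers _ (by decide), pvScoreB_eq answers _ (by decide),
      pvScoreB_eq answers _ (by decide)]
  exact pvAssemble _ _ _
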